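-- pv_equiv track=rewrite | github.com/ChanghyunRyu/Python-CodingTest-note | pccp/treasure_map/treasure_map.py | solution
-- ===== SOURCE A (Python) =====
-- from collections import deque
--
-- def solution(n, m, hole):
--     mp = [[0]*m for _ in range(n)]
--     for x, y in hole:
--         mp[x-1][y-1] = 1
--     visited = [[[-1, -1] for _ in range(m)] for _ in range(n)]
--     q = deque()
--     q.append((0, 0, 0))
--     visited[0][0][0] = 0
--     direction = [[0, 1], [1, 0], [0, -1], [-1, 0]]
--     while q:
--         x, y, j = q.popleft()
--         if mp[x][y] == 1:
--             continue
--         for dx, dy in direction: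
--             nx = x+dx
--             ny = y+dy
--             outside = nx < 0 or ny < 0 or nx > n-1 or ny > m-1
--             if outside or mp[nx][ny] > 0 or visited[nx][ny][j] != -1:
--                 continue
--             q.append((nx, ny, j))
--             visited[nx][ny][j] = visited[x][y][j] + 1
--         if j:
--             continue
--         for dx, dy in direction:
--             nx = x+dx*2
--             ny = y+dy*2
--             outside = nx < 0 or ny < 0 or nx > n-1 or ny > m-1
--             if outside or mp[nx][ny] > 0 or visited[nx][ny][j+1] != -1:
--                 continue
--             q.append((nx, ny, j+1))
--             visited[nx][ny][j+1] = visited[x][y][j] + 1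
--     answer = visited[n-1][m-1][1]
--     if 0 <= visited[n-1][m-1][0] < visited[n-1][m-1][1]:
--         answer = visited[n-1][m-1][0]
--     return answer
-- ===== SOURCE B (Python) =====
-- from collections import deque
--
-- def solution(n, m, hole):
--     # Two standard single-step BFS passes (from the start and from the goal)
--     # plus one scan over all double-step edges, instead of one BFS on the
--     # layered (cell, jumped?) graph; same final combine rule.
--     blocked = [[False] * m for _ in range(n)]
--     for x, y in hole:
--         blocked[x - 1][y - 1] = True
--     dirs = ((0, 1), (1, 0), (0, -1), (-1, 0))
--
--     def bfs(sx, sy):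
--         dist = [[-1] * m for _ in range(n)]
--         dist[sx][sy] = 0
--         q = deque([(sx, sy)])
--         while q:
--             x, y = q.popleft()
--             if blocked[x][y]:
--                 continue
--             for dx, dy in dirs:
--                 nx, ny = x + dx, y + dy
--                 if 0 <= nx < n and 0 <= ny < m and not blocked[nx][ny] and dist[nx][ny] < 0:
--                     dist[nx][ny] = dist[x][y] + 1
--                     q.append((nx, ny))
--         return dist
--
--     dist_s = bfs(0, 0)
--     dist_e = bfs(n - 1, m - 1)
--     jump = -1
--     for x in range(n):
--         for y in range(m):
--             if blocked[x][y] or dist_s[x][y] < 0: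
--                 continue
--             for dx, dy in dirs:
--                 nx, ny = x + 2 * dx, y + 2 * dy
--                 if 0 <= nx < n and 0 <= ny < m and not blocked[nx][ny] and dist_e[nx][ny] >= 0:
--                     cand = dist_s[x][y] + 1 + dist_e[nx][ny]
--                     if jump < 0 or cand < jump:
--                         jump = cand
--     no_jump = dist_s[n - 1][m - 1]
--     return no_jump if 0 <= no_jump < jump else jump
-- ===== Notes on version B (the rewrite author's own statement) =====
-- stated objective: alternative
-- what changed: Replaces A's single BFS over the layered (cell, jump-used) state graph by two independent plain single-step BFS passes (from the start and from the goal) plus one scan over all double-step edges taking min of distS[u]+1+distE[v]; the final combine rule is unchanged.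
import Mathlib
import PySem

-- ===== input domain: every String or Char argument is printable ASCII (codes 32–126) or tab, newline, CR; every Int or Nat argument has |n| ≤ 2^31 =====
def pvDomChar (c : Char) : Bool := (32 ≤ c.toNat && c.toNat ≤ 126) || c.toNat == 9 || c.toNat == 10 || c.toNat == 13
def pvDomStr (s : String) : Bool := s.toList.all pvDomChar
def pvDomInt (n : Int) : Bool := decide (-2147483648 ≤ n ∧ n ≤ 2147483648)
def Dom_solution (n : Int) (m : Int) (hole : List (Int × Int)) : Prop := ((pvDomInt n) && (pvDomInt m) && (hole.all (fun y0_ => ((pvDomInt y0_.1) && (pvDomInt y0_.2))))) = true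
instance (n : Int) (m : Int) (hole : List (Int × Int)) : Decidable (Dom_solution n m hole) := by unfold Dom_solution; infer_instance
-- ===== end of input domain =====

-- B replaces A's single BFS on the layered (cell, jump-used) graph by two plain
-- single-step BFS passes (from start and goal) plus one scan over all
-- double-step edges, keeping the same final combine rule; same asymptotic cost.

-- ===== PORT A =====
-- the `direction` list of A
def dirsA : List (Int × Int) := [(0, 1), (1, 0), (0, -1), (-1, 0)]

-- Python's negative-index wraparound for `mp[x-1][y-1] = 1` (index in [-len, len-1])
def wrapA (len i : Int) : Int := if i < 0 then len + i else i

-- body of A's inner `for dx, dy in direction` loops: try to visit candidate c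
-- from popped node p; state = (queue, visited); visited is A's 3D list kept as
-- a map holding exactly the entries A has overwritten (absent = still -1)
def relaxA (n m : Int) (mp : Int × Int → Int) (p c : Int × Int × Int)
    (s : List (Int × Int × Int) × Std.HashMap (Int × Int × Int) Int) :
    List (Int × Int × Int) × Std.HashMap (Int × Int × Int) Int :=
  if c.1 < 0 ∨ c.2.1 < 0 ∨ c.1 > n - 1 ∨ c.2.1 > m - 1 ∨ mp (c.1, c.2.1) > 0 ∨
      s.2.getD c (-1) ≠ -1 then s
  else (s.1 ++ [c], s.2.insert c (s.2.getD p (-1) + 1))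

-- A's `while q:` loop; fuel only makes it total (the proof shows it never runs out)
def solLoop (n m : Int) (mp : Int × Int → Int) :
    Nat → List (Int × Int × Int) → Std.HashMap (Int × Int × Int) Int →
      Std.HashMap (Int × Int × Int) Int
  | 0, _, visited => visited
  | _ + 1, [], visited => visited
  | fuel + 1, (x, y, j) :: q, visited =>
    if mp (x, y) = 1 then solLoop n m mp fuel q visited
    else
      let s1 := dirsA.foldl (fun s d => relaxA n m mp (x, y, j) (x + d.1, y + d.2, j) s) (q, visited)
      if j ≠ 0 then solLoop n m mp fuel s1.1 s1.2
      else
        let s2 := dirsA.foldl (fun s d => relaxA n m mp (x, y, j) (x + d.1 * 2, y + d.2 * 2, j + 1) s) s1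
        solLoop n m mp fuel s2.1 s2.2

def solution (n : Int) (m : Int) (hole : List (Int × Int)) : Int :=
  -- mp as a function (Int × Int) → Int, the values of A's 2D list `mp`
  let mp : Int × Int → Int :=
    hole.foldl (fun f p => fun c => if c = (wrapA n (p.1 - 1), wrapA m (p.2 - 1)) then 1 else f c)
      (fun _ => 0)
  let visited0 : Std.HashMap (Int × Int × Int) Int :=
    Std.HashMap.emptyWithCapacity.insert (0, 0, 0) 0
  let visited := solLoop n m mp (2 * n.toNat * m.toNat + 2) [(0, 0, 0)] visited0
  let answer := visited.getD (n - 1, m - 1, 1) (-1)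
  if 0 ≤ visited.getD (n - 1, m - 1, 0) (-1) ∧
      visited.getD (n - 1, m - 1, 0) (-1) < visited.getD (n - 1, m - 1, 1) (-1) then
    visited.getD (n - 1, m - 1, 0) (-1)
  else answer

-- ===== PORT B =====
-- the `dirs` tuple of B
def dirsB : List (Int × Int) := [(0, 1), (1, 0), (0, -1), (-1, 0)]

-- Python's negative-index wraparound for `blocked[x-1][y-1] = True`
def wrapB (len i : Int) : Int := if i < 0 then len + i else i

-- body of B's bfs-inner `for dx, dy in dirs` loop; state = (queue, dist);
-- dist is B's 2D list kept as a map (absent = still -1)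
def relaxBfs (n m : Int) (blocked : Int × Int → Bool) (p c : Int × Int)
    (s : List (Int × Int) × Std.HashMap (Int × Int) Int) :
    List (Int × Int) × Std.HashMap (Int × Int) Int :=
  if 0 ≤ c.1 ∧ c.1 < n ∧ 0 ≤ c.2 ∧ c.2 < m ∧ blocked c = false ∧ s.2.getD c (-1) < 0 then
    (s.1 ++ [c], s.2.insert c (s.2.getD p (-1) + 1))
  else s

-- B's `while q:` loop inside bfs; fuel only makes it total
def bfsLoop (n m : Int) (blocked : Int × Int → Bool) :
    Nat → List (Int × Int) → Std.HashMap (Int × Int) Int → Std.HashMap (Int × Int) Int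
  | 0, _, dist => dist
  | _ + 1, [], dist => dist
  | fuel + 1, (x, y) :: q, dist =>
    if blocked (x, y) = true then bfsLoop n m blocked fuel q dist
    else
      let s := dirsB.foldl (fun s d => relaxBfs n m blocked (x, y) (x + d.1, y + d.2) s) (q, dist)
      bfsLoop n m blocked fuel s.1 s.2

-- B's helper `bfs(sx, sy)`
def bfsB (n m : Int) (blocked : Int × Int → Bool) (sx sy : Int) :
    Std.HashMap (Int × Int) Int :=
  bfsLoop n m blocked (n.toNat * m.toNat + 2) [(sx, sy)]
    (Std.HashMap.emptyWithCapacity.insert (sx, sy) 0)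

-- B's triple `for x in range(n): for y in range(m): for dx, dy in dirs:` scan
def jumpMin (n m : Int) (blocked : Int × Int → Bool)
    (distS distE : Std.HashMap (Int × Int) Int) : Int :=
  (PySem.List.pyRange 0 n 1).foldl (fun acc x =>
    (PySem.List.pyRange 0 m 1).foldl (fun acc y =>
      if blocked (x, y) = true ∨ distS.getD (x, y) (-1) < 0 then acc
      else dirsB.foldl (fun acc d =>
        if 0 ≤ x + 2 * d.1 ∧ x + 2 * d.1 < n ∧ 0 ≤ y + 2 * d.2 ∧ y + 2 * d.2 < m ∧
            blocked (x + 2 * d.1, y + 2 * d.2) = false ∧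
            0 ≤ distE.getD (x + 2 * d.1, y + 2 * d.2) (-1) then
          if acc < 0 ∨ distS.getD (x, y) (-1) + 1 + distE.getD (x + 2 * d.1, y + 2 * d.2) (-1) < acc then
            distS.getD (x, y) (-1) + 1 + distE.getD (x + 2 * d.1, y + 2 * d.2) (-1)
          else acc
        else acc) acc) acc) (-1)

def solution_alt (n : Int) (m : Int) (hole : List (Int × Int)) : Int :=
  let blocked : Int × Int → Bool :=
    hole.foldl (fun f p => fun c => if c = (wrapB n (p.1 - 1), wrapB m (p.2 - 1)) then true else f c)
      (fun _ => false)
  let distS := bfsB n m blocked 0 0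
  let distE := bfsB n m blocked (n - 1) (m - 1)
  let jump := jumpMin n m blocked distS distE
  let noJump := distS.getD (n - 1, m - 1) (-1)
  if 0 ≤ noJump ∧ noJump < jump then noJump else jump

-- ===== PRECONDITION & SPEC =====
-- Pre_ is exactly the set of inputs on which A returns normally: a non-empty
-- grid and every hole index `x-1`,`y-1` inside Python's list-index wrap range
-- (outside it A — and B — raises IndexError).
def Pre_solution (n : Int) (m : Int) (hole : List (Int × Int)) : Prop :=
  1 ≤ n ∧ 1 ≤ m ∧ ∀ p ∈ hole, -n ≤ p.1 - 1 ∧ p.1 - 1 < n ∧ -m ≤ p.2 - 1 ∧ p.2 - 1 < m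
instance (n : Int) (m : Int) (hole : List (Int × Int)) : Decidable (Pre_solution n m hole) := by
  unfold Pre_solution; infer_instance

def pvWitness_solution : Int × Int × (List (Int × Int)) := (2, 2, [(2, 1)])

def Spec_solution (n : Int) (m : Int) (hole : List (Int × Int)) (out : Int) : Prop := out = solution_alt n m hole
instance (n : Int) (m : Int) (hole : List (Int × Int)) (out : Int) : Decidable (Spec_solution n m hole out) := by unfold Spec_solution; infer_instance

-- ===== CLAIM =====
def Claim_equal_solution : Prop := ∀ (n : Int) (m : Int) (hole : List (Int × Int)), Dom_solution n m hole → Pre_solution n m hole → Spec_solution n m hole (solution n m hole)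

-- ===== LEMMAS AND PROOFS =====

-- proof layer: the same two programs with the array stores kept as total
-- functions (absent = -1); the ports are bridged to these below
def relaxAF (n m : Int) (mp : Int × Int → Int) (p c : Int × Int × Int)
    (s : List (Int × Int × Int) × ((Int × Int × Int) → Int)) :
    List (Int × Int × Int) × ((Int × Int × Int) → Int) :=
  if c.1 < 0 ∨ c.2.1 < 0 ∨ c.1 > n - 1 ∨ c.2.1 > m - 1 ∨ mp (c.1, c.2.1) > 0 ∨ s.2 c ≠ -1 then s
  else (s.1 ++ [c], fun v => if v = c then s.2 p + 1 else s.2 v)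

def solLoopF (n m : Int) (mp : Int × Int → Int) :
    Nat → List (Int × Int × Int) → ((Int × Int × Int) → Int) → ((Int × Int × Int) → Int)
  | 0, _, visited => visited
  | _ + 1, [], visited => visited
  | fuel + 1, (x, y, j) :: q, visited =>
    if mp (x, y) = 1 then solLoopF n m mp fuel q visited
    else
      let s1 := dirsA.foldl (fun s d => relaxAF n m mp (x, y, j) (x + d.1, y + d.2, j) s) (q, visited)
      if j ≠ 0 then solLoopF n m mp fuel s1.1 s1.2
      else
        let s2 := dirsA.foldl (fun s d => relaxAF n m mp (x, y, j) (x + d.1 * 2, y + d.2 * 2, j + 1) s) s1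
        solLoopF n m mp fuel s2.1 s2.2

def relaxBfsF (n m : Int) (blocked : Int × Int → Bool) (p c : Int × Int)
    (s : List (Int × Int) × ((Int × Int) → Int)) :
    List (Int × Int) × ((Int × Int) → Int) :=
  if 0 ≤ c.1 ∧ c.1 < n ∧ 0 ≤ c.2 ∧ c.2 < m ∧ blocked c = false ∧ s.2 c < 0 then
    (s.1 ++ [c], fun v => if v = c then s.2 p + 1 else s.2 v)
  else s

def bfsLoopF (n m : Int) (blocked : Int × Int → Bool) :
    Nat → List (Int × Int) → ((Int × Int) → Int) → ((Int × Int) → Int)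
  | 0, _, dist => dist
  | _ + 1, [], dist => dist
  | fuel + 1, (x, y) :: q, dist =>
    if blocked (x, y) = true then bfsLoopF n m blocked fuel q dist
    else
      let s := dirsB.foldl (fun s d => relaxBfsF n m blocked (x, y) (x + d.1, y + d.2) s) (q, dist)
      bfsLoopF n m blocked fuel s.1 s.2

def bfsBF (n m : Int) (blocked : Int × Int → Bool) (sx sy : Int) : (Int × Int) → Int :=
  bfsLoopF n m blocked (n.toNat * m.toNat + 2) [(sx, sy)] (fun v => if v = (sx, sy) then 0 else -1)

def jumpMinF (n m : Int) (blocked : Int × Int → Bool) (distS distE : (Int × Int) → Int) : Int :=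
  (PySem.List.pyRange 0 n 1).foldl (fun acc x =>
    (PySem.List.pyRange 0 m 1).foldl (fun acc y =>
      if blocked (x, y) = true ∨ distS (x, y) < 0 then acc
      else dirsB.foldl (fun acc d =>
        if 0 ≤ x + 2 * d.1 ∧ x + 2 * d.1 < n ∧ 0 ≤ y + 2 * d.2 ∧ y + 2 * d.2 < m ∧
            blocked (x + 2 * d.1, y + 2 * d.2) = false ∧ 0 ≤ distE (x + 2 * d.1, y + 2 * d.2) then
          if acc < 0 ∨ distS (x, y) + 1 + distE (x + 2 * d.1, y + 2 * d.2) < acc then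
            distS (x, y) + 1 + distE (x + 2 * d.1, y + 2 * d.2)
          else acc
        else acc) acc) acc) (-1)

-- walks in a graph given by relation E, with explicit length
inductive PvWalk {α : Type} (E : α → α → Prop) : α → α → Nat → Prop
  | refl (x : α) : PvWalk E x x 0
  | cons {x y z : α} {k : Nat} : E x y → PvWalk E y z k → PvWalk E x z (k + 1)

theorem pvWalk_append {α : Type} {E : α → α → Prop} {x y z : α} {a b : Nat}
    (h1 : PvWalk E x y a) (h2 : PvWalk E y z b) : PvWalk E x z (a + b) := by
  induction h1 with
  | refl => simpa using h2
  | @cons x' y' z' k' e _ ih =>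
    have h3 := PvWalk.cons e (ih h2)
    have : k' + b + 1 = k' + 1 + b := by omega
    rwa [← this]

theorem pvWalk_snoc {α : Type} {E : α → α → Prop} {x y z : α} {a : Nat}
    (h1 : PvWalk E x y a) (e : E y z) : PvWalk E x z (a + 1) :=
  pvWalk_append h1 (PvWalk.cons e (PvWalk.refl z))

theorem pvWalk_unsnoc {α : Type} {E : α → α → Prop} {x z : α} {k : Nat}
    (h : PvWalk E x z (k + 1)) : ∃ y, PvWalk E x y k ∧ E y z := by
  induction k generalizing x with
  | zero =>
    cases h with
    | cons e w => cases w with | refl => exact ⟨x, PvWalk.refl x, e⟩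
  | succ k ih =>
    cases h with
    | cons e w =>
      obtain ⟨y, w', e'⟩ := ih w
      exact ⟨y, PvWalk.cons e w', e'⟩

-- edge relation generated by per-node candidate lists with an expand- and an enter-guard
def gEdge {α : Type} (exp ok : α → Prop) (cand : α → List α) (u v : α) : Prop :=
  exp u ∧ ok v ∧ v ∈ cand u

-- generic relaxation (push candidate c from popped p) and queue loop
def gRelax {α : Type} [DecidableEq α] (ok : α → Prop) [DecidablePred ok] (p c : α)
    (s : List α × (α → Int)) : List α × (α → Int) :=
  if ok c ∧ s.2 c = -1 then (s.1 ++ [c], fun v => if v = c then s.2 p + 1 else s.2 v) else s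

def gLoop {α : Type} [DecidableEq α] (exp ok : α → Prop) [DecidablePred exp] [DecidablePred ok]
    (cand : α → List α) : Nat → List α → (α → Int) → (α → Int)
  | 0, _, vis => vis
  | _ + 1, [], vis => vis
  | fuel + 1, x :: q, vis =>
    if exp x then
      let s := (cand x).foldl (fun s c => gRelax ok x c s) (q, vis)
      gLoop exp ok cand fuel s.1 s.2
    else gLoop exp ok cand fuel q vis

-- "F is the BFS distance array": -1 on unreachable nodes, exact shortest walk length elsewhere
def IsBFS {α : Type} (E : α → α → Prop) (s : α) (F : α → Int) : Prop :=
  ∀ v, ((∀ k, ¬ PvWalk E s v k) ∧ F v = -1) ∨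
    (∃ k : Nat, F v = (k : Int) ∧ PvWalk E s v k ∧ ∀ j, PvWalk E s v j → k ≤ j)

theorem isBFS_agree_at {α β : Type} {E : α → α → Prop} {E' : β → β → Prop} {s : α} {s' : β}
    {F : α → Int} {F' : β → Int} (h : IsBFS E s F) (h' : IsBFS E' s' F')
    {v : α} {v' : β} (hw : ∀ k, PvWalk E s v k ↔ PvWalk E' s' v' k) : F v = F' v' := by
  rcases h v with ⟨hn, he⟩ | ⟨k, hk, hwk, hmin⟩
  · rcases h' v' with ⟨_, he'⟩ | ⟨k, _, hwk, _⟩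
    · rw [he, he']
    · exact absurd ((hw k).2 hwk) (hn k)
  · rcases h' v' with ⟨hn', _⟩ | ⟨k', hk', hwk', hmin'⟩
    · exact absurd ((hw k).1 hwk) (hn' k)
    · have h1 := hmin k' ((hw k').2 hwk')
      have h2 := hmin' k ((hw k).1 hwk)
      rw [hk, hk']
      omega

-- main loop invariant: seen = assigned nodes, with exact distances; queue sorted, spread ≤ 1
def gInv {α : Type} (E : α → α → Prop) (s : α) (S seen : Finset α)
    (Q : List α) (vis : α → Int) : Prop :=
  (∀ v, vis v ≠ -1 ↔ v ∈ seen) ∧ seen ⊆ S ∧ s ∈ seen ∧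
  (∀ v ∈ seen, ∃ k : Nat, vis v = (k : Int) ∧ PvWalk E s v k ∧ ∀ j, PvWalk E s v j → k ≤ j) ∧
  (∀ a ∈ Q, a ∈ seen) ∧
  List.Pairwise (fun a b => vis a ≤ vis b) Q ∧
  (∀ a ∈ Q, ∀ b ∈ Q, vis b ≤ vis a + 1) ∧
  (∀ u ∈ seen, u ∉ Q → ∀ v, E u v → vis v ≠ -1)

-- invariant while expanding the popped node x (distance D); Δ = nodes pushed so far
def gInvF {α : Type} (E : α → α → Prop) (s : α) (S seen : Finset α) (x : α) (D : Nat)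
    (q Δ : List α) (vis : α → Int) : Prop :=
  (∀ v, vis v ≠ -1 ↔ v ∈ seen) ∧ seen ⊆ S ∧ s ∈ seen ∧
  (∀ v ∈ seen, ∃ k : Nat, vis v = (k : Int) ∧ PvWalk E s v k ∧ ∀ j, PvWalk E s v j → k ≤ j) ∧
  (∀ a ∈ q, a ∈ seen ∧ (D : Int) ≤ vis a ∧ vis a ≤ (D : Int) + 1) ∧
  (∀ a ∈ Δ, a ∈ seen ∧ vis a = (D : Int) + 1) ∧
  List.Pairwise (fun a b => vis a ≤ vis b) q ∧
  vis x = (D : Int) ∧ x ∈ seen ∧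
  (∀ u ∈ seen, u ∉ x :: (q ++ Δ) → ∀ v, E u v → vis v ≠ -1) ∧
  (∀ v, vis v = -1 → ∀ j, PvWalk E s v j → D + 1 ≤ j)

-- every walk of length j to a still-unassigned node is longer than the popped distance
theorem gLow {α : Type} {E : α → α → Prop} {s : α} {S seen : Finset α}
    {x : α} {q : List α} {vis : α → Int} {D : Nat}
    (hinv : gInv E s S seen (x :: q) vis) (hxD : vis x = (D : Int)) :
    ∀ v, vis v = -1 → ∀ j, PvWalk E s v j → D + 1 ≤ j := by
  obtain ⟨hiff, _, hsrc, hex, hqs, hpw, hspread, hcomp⟩ := hinv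
  intro v hv j
  induction j using Nat.strong_induction_on generalizing v with
  | _ j ih =>
    intro hw
    match j, hw with
    | 0, hw =>
      cases hw
      exact absurd hv ((hiff s).2 hsrc)
    | (j + 1), hw =>
      obtain ⟨u, hwu, he⟩ := pvWalk_unsnoc hw
      by_cases hu : vis u = -1
      · have := ih j (by omega) u hu hwu
        omega
      · have huseen : u ∈ seen := (hiff u).1 hu
        by_cases huq : u ∈ x :: q
        · obtain ⟨k, hk, _, hmin⟩ := hex u huseen
          have hkj : k ≤ j := hmin j hwu
          have hDk : (D : Int) ≤ vis u := by
            rcases List.mem_cons.1 huq with rfl | huq'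
            · rw [hxD]
            · have := List.rel_of_pairwise_cons hpw huq'
              rw [hxD] at this; exact this
          rw [hk] at hDk
          have : D ≤ k := by exact_mod_cast hDk
          omega
        · exact absurd (hcomp u huseen huq v he) (by simp [hv])

-- one relaxation step preserves the fold invariant
theorem gStep {α : Type} [DecidableEq α] {exp ok : α → Prop} [DecidablePred exp] [DecidablePred ok]
    {cand : α → List α} {s : α} {S seen : Finset α} {x : α} {D : Nat}
    {q Δ : List α} {vis : α → Int}
    (hcl : ∀ u v, u ∈ S → ok v → v ∈ cand u → v ∈ S)
    (hexp : exp x) (c : α) (hc : c ∈ cand x)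
    (hinv : gInvF (gEdge exp ok cand) s S seen x D q Δ vis) :
    ∃ Δ' seen', (gRelax ok x c (q ++ Δ, vis)).1 = q ++ Δ' ∧
      gInvF (gEdge exp ok cand) s S seen' x D q Δ' (gRelax ok x c (q ++ Δ, vis)).2 ∧
      seen.card + Δ'.length = seen'.card + Δ.length ∧
      (ok c → (gRelax ok x c (q ++ Δ, vis)).2 c ≠ -1) ∧
      (∀ v, vis v ≠ -1 → (gRelax ok x c (q ++ Δ, vis)).2 v = vis v) := by
  obtain ⟨hiff, hsub, hsrc, hex, hq, hΔ, hpw, hxD, hxseen, hcomp, hlow⟩ := hinv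
  by_cases hg : ok c ∧ vis c = -1
  · have hcnotseen : c ∉ seen := fun h => absurd ((hiff c).2 h) (by simp [hg.2])
    have hvis' : (gRelax ok x c (q ++ Δ, vis)).2 = fun v => if v = c then vis x + 1 else vis v := by
      simp [gRelax, hg]
    have hq' : (gRelax ok x c (q ++ Δ, vis)).1 = q ++ (Δ ++ [c]) := by
      simp [gRelax, hg]
    obtain ⟨k, hk, hwx, _⟩ := hex x hxseen
    have hkD : k = D := by rw [hxD] at hk; exact_mod_cast hk.symm
    subst hkD
    have hwc : PvWalk (gEdge exp ok cand) s c (k + 1) :=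
      pvWalk_snoc hwx ⟨hexp, hg.1, hc⟩
    refine ⟨Δ ++ [c], insert c seen, hq', ?_, ?_, ?_, ?_⟩
    · rw [hvis']
      refine ⟨?_, ?_, ?_, ?_, ?_, ?_, ?_, ?_, ?_, ?_, ?_⟩
      · intro v
        by_cases hvc : v = c
        · subst hvc; simp [hxD]; omega
        · simp only [hvc, if_false, Finset.mem_insert, hvc, false_or]
          exact hiff v
      · intro v hv
        rcases Finset.mem_insert.1 hv with rfl | hv
        · exact hcl x v (hsub hxseen) hg.1 hc
        · exact hsub hv
      · exact Finset.mem_insert_of_mem hsrc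
      · intro v hv
        rcases Finset.mem_insert.1 hv with rfl | hv
        · refine ⟨k + 1, by simp [hxD], hwc, ?_⟩
          intro j hj
          exact hlow v hg.2 j hj
        · have hvne : v ≠ c := fun h => hcnotseen (h ▸ hv)
          simpa [hvne] using hex v hv
      · intro a ha
        have := hq a ha
        have hane : a ≠ c := fun h => hcnotseen (h ▸ this.1)
        simp only [hane, if_false]
        exact ⟨Finset.mem_insert_of_mem this.1, this.2.1, this.2.2⟩
      · intro a ha
        rcases List.mem_append.1 ha with ha' | ha'
        · have := hΔ a ha'
          have hane : a ≠ c := fun h => hcnotseen (h ▸ this.1)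
          simp only [hane, if_false]
          exact ⟨Finset.mem_insert_of_mem this.1, this.2⟩
        · have : a = c := by simpa using ha'
          subst this
          simp [Finset.mem_insert_self, hxD]
      · refine List.Pairwise.imp_of_mem ?_ hpw
        intro a b ha hb h
        have hane : a ≠ c := fun h' => hcnotseen (h' ▸ (hq a ha).1)
        have hbne : b ≠ c := fun h' => hcnotseen (h' ▸ (hq b hb).1)
        simpa [hane, hbne] using h
      · have hxne : x ≠ c := fun h => hcnotseen (h ▸ hxseen)
        simp [hxne, hxD]
      · exact Finset.mem_insert_of_mem hxseen
      · intro u hu hunot v he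
        have hune : u ≠ c := by
          intro h; subst h
          exact hunot (by simp)
        have hu' : u ∈ seen := by
          rcases Finset.mem_insert.1 hu with h | h
          · exact absurd h hune
          · exact h
        have : u ∉ x :: (q ++ Δ) := by
          intro h
          apply hunot
          rcases List.mem_cons.1 h with rfl | h'
          · simp
          · rcases List.mem_append.1 h' with h'' | h''
            · simp [h'']
            · simp [h'']
        have := hcomp u hu' this v he
        intro hcontra
        by_cases hvc : v = c
        · subst hvc
          simp only [if_pos rfl] at hcontra
          rw [hxD] at hcontra
          omega
        · simp only [hvc, if_false] at hcontra
          exact this hcontra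
      · intro v hv j hj
        by_cases hvc : v = c
        · subst hvc; simp [hxD] at hv; omega
        · simp only [hvc, if_false] at hv
          exact hlow v hv j hj
    · rw [Finset.card_insert_of_notMem hcnotseen]
      simp; omega
    · intro _
      rw [hvis']
      simp [hxD]; omega
    · intro v hv
      rw [hvis']
      have hvne : v ≠ c := fun h => hv (h ▸ hg.2)
      simp [hvne]
  · have hnop : gRelax ok x c (q ++ Δ, vis) = (q ++ Δ, vis) := by
      simp [gRelax, hg]
    refine ⟨Δ, seen, by rw [hnop], by rw [hnop]; exact ⟨hiff, hsub, hsrc, hex, hq, hΔ, hpw, hxD, hxseen, hcomp, hlow⟩, rfl, ?_, by rw [hnop]; exact fun v _ => rfl⟩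
    intro hok
    rw [hnop]
    intro hcontra
    exact hg ⟨hok, hcontra⟩

-- folding all candidates of x preserves the fold invariant and covers them
theorem gFold {α : Type} [DecidableEq α] {exp ok : α → Prop} [DecidablePred exp] [DecidablePred ok]
    {cand : α → List α} {s : α} {S : Finset α} {x : α} {D : Nat}
    (hcl : ∀ u v, u ∈ S → ok v → v ∈ cand u → v ∈ S) (hexp : exp x) :
    ∀ (cs : List α) (q Δ : List α) (vis : α → Int) (seen : Finset α),
      (∀ c ∈ cs, c ∈ cand x) →
      gInvF (gEdge exp ok cand) s S seen x D q Δ vis →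
      ∃ Δ' seen',
        (cs.foldl (fun s c => gRelax ok x c s) (q ++ Δ, vis)).1 = q ++ Δ' ∧
        gInvF (gEdge exp ok cand) s S seen' x D q Δ'
          (cs.foldl (fun s c => gRelax ok x c s) (q ++ Δ, vis)).2 ∧
        seen.card + Δ'.length = seen'.card + Δ.length ∧
        (∀ c ∈ cs, ok c → (cs.foldl (fun s c => gRelax ok x c s) (q ++ Δ, vis)).2 c ≠ -1) ∧
        (∀ v, vis v ≠ -1 → (cs.foldl (fun s c => gRelax ok x c s) (q ++ Δ, vis)).2 v = vis v) := by
  intro cs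
  induction cs with
  | nil =>
    intro q Δ vis seen _ hinv
    exact ⟨Δ, seen, rfl, hinv, rfl, by simp, fun v _ => rfl⟩
  | cons c cs ih =>
    intro q Δ vis seen hcs hinv
    obtain ⟨Δ₁, seen₁, e1, hinv₁, hcard₁, hok₁, hmono₁⟩ :=
      gStep hcl hexp c (hcs c (by simp)) hinv
    have hre : gRelax ok x c (q ++ Δ, vis) = (q ++ Δ₁, (gRelax ok x c (q ++ Δ, vis)).2) := by
      rw [← e1]
    obtain ⟨Δ₂, seen₂, e2, hinv₂, hcard₂, hok₂, hmono₂⟩ :=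
      ih q Δ₁ (gRelax ok x c (q ++ Δ, vis)).2 seen₁ (fun c' hc' => hcs c' (by simp [hc'])) hinv₁
    rw [List.foldl_cons, hre]
    refine ⟨Δ₂, seen₂, e2, hinv₂, by omega, ?_, ?_⟩
    · intro c' hc' hokc'
      rcases List.mem_cons.1 hc' with rfl | hc''
      · have h1 := hok₁ hokc'
        rw [hmono₂ c' h1]
        exact h1
      · exact hok₂ c' hc'' hokc'
    · intro v hv
      rw [hmono₂ v (by rw [hmono₁ v hv]; exact hv), hmono₁ v hv]

-- the whole loop, from any invariant state, computes the BFS distance array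
theorem gLoop_inv_isBFS {α : Type} [DecidableEq α] {exp ok : α → Prop}
    [DecidablePred exp] [DecidablePred ok] {cand : α → List α} {s : α} {S : Finset α}
    (hcl : ∀ u v, u ∈ S → ok v → v ∈ cand u → v ∈ S) :
    ∀ (fuel : Nat) (Q : List α) (vis : α → Int) (seen : Finset α),
      gInv (gEdge exp ok cand) s S seen Q vis →
      Q.length + (S.card - seen.card) + 1 ≤ fuel →
      IsBFS (gEdge exp ok cand) s (gLoop exp ok cand fuel Q vis) := by
  intro fuel
  induction fuel with
  | zero => intro Q vis seen _ hf; omega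
  | succ fuel ihf =>
    intro Q vis seen hinv hf
    match Q with
    | [] =>
      show IsBFS _ _ vis
      obtain ⟨hiff, _, hsrc, hex, _, _, _, hcomp⟩ := hinv
      have hreach : ∀ k v, PvWalk (gEdge exp ok cand) s v k → vis v ≠ -1 := by
        intro k
        induction k with
        | zero => intro v hw; cases hw; exact (hiff s).2 hsrc
        | succ k ihk =>
          intro v hw
          obtain ⟨u, hwu, he⟩ := pvWalk_unsnoc hw
          exact hcomp u ((hiff u).1 (ihk u hwu)) (by simp) v he
      intro v
      by_cases hv : vis v = -1
      · exact Or.inl ⟨fun k hw => hreach k v hw hv, hv⟩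
      · exact Or.inr (hex v ((hiff v).1 hv))
    | x :: q =>
      obtain ⟨hiff, hsub, hsrc, hex, hqs, hpw, hspread, hcomp⟩ := hinv
      by_cases hexp : exp x
      · obtain ⟨D, hxD, hwx, hminx⟩ := hex x (hqs x (by simp))
        have hlow := gLow (D := D) ⟨hiff, hsub, hsrc, hex, hqs, hpw, hspread, hcomp⟩ hxD
        have hinvF : gInvF (gEdge exp ok cand) s S seen x D q [] vis := by
          refine ⟨hiff, hsub, hsrc, hex, ?_, by simp, List.Pairwise.of_cons hpw, hxD, hqs x (by simp), ?_, hlow⟩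
          · intro a ha
            refine ⟨hqs a (by simp [ha]), ?_, ?_⟩
            · have := List.rel_of_pairwise_cons hpw ha
              rw [hxD] at this; exact this
            · have := hspread x (by simp) a (by simp [ha])
              rw [hxD] at this; exact this
          · intro u hu hunot v he
            exact hcomp u hu (by simpa using hunot) v he
        obtain ⟨Δ', seen', e1, hinv', hcard', hok', hmono'⟩ :=
          gFold hcl hexp (cand x) q [] vis seen (fun c hc => hc) hinvF
        rw [List.append_nil] at e1 hinv' hok' hmono'
        set st := (cand x).foldl (fun s c => gRelax ok x c s) (q, vis) with hst
        obtain ⟨hiff', hsub', hsrc', hex', hq', hΔ', hpw', hxD', hxseen', hcomp', _⟩ := hinv'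
        have hinv2 : gInv (gEdge exp ok cand) s S seen' (q ++ Δ') st.2 := by
          refine ⟨hiff', hsub', hsrc', hex', ?_, ?_, ?_, ?_⟩
          · intro a ha
            rcases List.mem_append.1 ha with h | h
            · exact (hq' a h).1
            · exact (hΔ' a h).1
          · rw [List.pairwise_append]
            refine ⟨hpw', ?_, ?_⟩
            · exact List.pairwise_of_forall_mem_list (fun a ha b hb => by
                rw [(hΔ' a ha).2, (hΔ' b hb).2])
            · intro a ha b hb
              rw [(hΔ' b hb).2]
              exact (hq' a ha).2.2
          · intro a ha b hb
            have hva : (D : Int) ≤ st.2 a := by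
              rcases List.mem_append.1 ha with h | h
              · exact (hq' a h).2.1
              · rw [(hΔ' a h).2]; omega
            have hvb : st.2 b ≤ (D : Int) + 1 := by
              rcases List.mem_append.1 hb with h | h
              · exact (hq' b h).2.2
              · rw [(hΔ' b h).2]
            omega
          · intro u hu hunot v he
            by_cases hux : u = x
            · subst hux
              obtain ⟨_, hokv, hvc⟩ := he
              exact hok' v hvc hokv
            · refine hcomp' u hu ?_ v he
              intro hmem
              rcases List.mem_cons.1 hmem with h | h
              · exact hux h
              · exact hunot h
        have hseenle : seen'.card ≤ S.card := Finset.card_le_card hsub'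
        have : gLoop exp ok cand (fuel + 1) (x :: q) vis =
            gLoop exp ok cand fuel st.1 st.2 := by
          show (if exp x then _ else _) = _
          rw [if_pos hexp]
        rw [this, e1]
        refine ihf (q ++ Δ') st.2 seen' (by rw [← e1]; exact (e1 ▸ hinv2)) ?_
        have hseenle0 : seen.card ≤ S.card := Finset.card_le_card hsub
        simp only [List.length_nil] at hcard'
        rw [List.length_append]
        simp only [List.length_cons] at hf
        omega
      · have : gLoop exp ok cand (fuel + 1) (x :: q) vis = gLoop exp ok cand fuel q vis := by
          show (if exp x then _ else _) = _
          rw [if_neg hexp]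
        rw [this]
        refine ihf q vis seen ⟨hiff, hsub, hsrc, hex, ?_, ?_, ?_, ?_⟩ ?_
        · exact fun a ha => hqs a (by simp [ha])
        · exact List.Pairwise.of_cons hpw
        · exact fun a ha b hb => hspread a (by simp [ha]) b (by simp [hb])
        · intro u hu hunot v he
          by_cases hux : u = x
          · subst hux
            exact absurd he.1 hexp
          · exact hcomp u hu (by simp [hux, hunot]) v he
        · simp only [List.length_cons] at hf
          omega

-- generic BFS correctness for the run from a single source
theorem gLoop_isBFS {α : Type} [DecidableEq α] {exp ok : α → Prop}
    [DecidablePred exp] [DecidablePred ok] {cand : α → List α} {s : α} {S : Finset α}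
    (hcl : ∀ u v, u ∈ S → ok v → v ∈ cand u → v ∈ S) (hs : s ∈ S)
    (fuel : Nat) (hfuel : S.card + 1 ≤ fuel) :
    IsBFS (gEdge exp ok cand) s
      (gLoop exp ok cand fuel [s] (fun v => if v = s then 0 else -1)) := by
  have hcard : 1 ≤ S.card := Finset.card_pos.2 ⟨s, hs⟩
  refine gLoop_inv_isBFS hcl fuel [s] _ {s} ⟨?_, ?_, ?_, ?_, ?_, ?_, ?_, ?_⟩ ?_
  · intro v
    by_cases hv : v = s <;> simp [hv]
  · intro v hv
    rw [Finset.mem_singleton.1 hv]; exact hs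
  · simp
  · intro v hv
    rw [Finset.mem_singleton.1 hv]
    exact ⟨0, by simp, PvWalk.refl s, fun j _ => by omega⟩
  · simp
  · simp
  · intro a ha b hb
    simp only [List.mem_singleton] at ha hb
    subst ha; subst hb; simp
  · intro u hu hunot
    rw [Finset.mem_singleton.1 hu] at hunot
    simp at hunot
  · simp
    omega

theorem pvWalk_zero {α : Type} {E : α → α → Prop} {x y : α} (h : PvWalk E x y 0) : x = y := by
  cases h; rfl

theorem pvWalk_succ {α : Type} {E : α → α → Prop} {x y : α} {k : Nat}
    (h : PvWalk E x y (k + 1)) : ∃ z, E x z ∧ PvWalk E z y k := by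
  cases h with
  | cons e w => exact ⟨_, e, w⟩

-- concrete graphs: the plain grid graph and the layered one
abbrev inGrid (n m : Int) (c : Int × Int) : Prop := 0 ≤ c.1 ∧ c.1 < n ∧ 0 ≤ c.2 ∧ c.2 < m

abbrev exp0 (H : Int × Int → Bool) (v : Int × Int) : Prop := H v = false
abbrev ok0 (n m : Int) (H : Int × Int → Bool) (c : Int × Int) : Prop := inGrid n m c ∧ H c = false
def cand0 (v : Int × Int) : List (Int × Int) := dirsB.map (fun d => (v.1 + d.1, v.2 + d.2))
def E0 (n m : Int) (H : Int × Int → Bool) : (Int × Int) → (Int × Int) → Prop :=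
  gEdge (exp0 H) (ok0 n m H) cand0

abbrev expL (H : Int × Int → Bool) (v : Int × Int × Int) : Prop := H (v.1, v.2.1) = false
abbrev okL (n m : Int) (H : Int × Int → Bool) (v : Int × Int × Int) : Prop :=
  inGrid n m (v.1, v.2.1) ∧ H (v.1, v.2.1) = false
def candL (v : Int × Int × Int) : List (Int × Int × Int) :=
  dirsA.map (fun d => (v.1 + d.1, v.2.1 + d.2, v.2.2)) ++
    (if v.2.2 = 0 then dirsA.map (fun d => (v.1 + d.1 * 2, v.2.1 + d.2 * 2, v.2.2 + 1)) else [])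
def EL (n m : Int) (H : Int × Int → Bool) : (Int × Int × Int) → (Int × Int × Int) → Prop :=
  gEdge (expL H) (okL n m H) candL

-- a one-jump edge from layer 0 to layer 1
def JumpE (n m : Int) (H : Int × Int → Bool) (p r : Int × Int) : Prop :=
  H p = false ∧ inGrid n m r ∧ H r = false ∧ ∃ d ∈ dirsA, r = (p.1 + 2 * d.1, p.2 + 2 * d.2)

-- edge shape lemmas
theorem mem_cand0_iff (v w : Int × Int) :
    w ∈ cand0 v ↔ ∃ d ∈ dirsA, w = (v.1 + d.1, v.2 + d.2) := by
  simp [cand0, dirsA, dirsB, eq_comm]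

theorem mem_candL_iff (v w : Int × Int × Int) :
    w ∈ candL v ↔ ((∃ d ∈ dirsA, w = (v.1 + d.1, v.2.1 + d.2, v.2.2)) ∨
      (v.2.2 = 0 ∧ ∃ d ∈ dirsA, w = (v.1 + d.1 * 2, v.2.1 + d.2 * 2, v.2.2 + 1))) := by
  by_cases h : v.2.2 = 0 <;> simp [candL, h, dirsA, eq_comm] <;> tauto

theorem edge01_iff (n m : Int) (H : Int × Int → Bool) (a b : Int × Int) :
    EL n m H (a.1, a.2, 0) (b.1, b.2, 1) ↔ JumpE n m H a b := by
  constructor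
  · rintro ⟨he, hok, hc⟩
    rw [mem_candL_iff] at hc
    rcases hc with ⟨d, hd, heq⟩ | ⟨_, d, hd, heq⟩
    · exfalso
      have := congrArg (fun t => t.2.2) heq
      simp at this
    · refine ⟨he, hok.1, hok.2, d, hd, ?_⟩
      have h1 := congrArg (fun t => t.1) heq
      have h2 := congrArg (fun t => t.2.1) heq
      simp at h1 h2
      ext <;> simp [h1, h2] <;> ring
  · rintro ⟨hp, hin, hr, d, hd, heq⟩
    refine ⟨hp, ⟨by simpa [heq] using hin, by simpa [heq] using hr⟩, ?_⟩
    rw [mem_candL_iff]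
    right
    refine ⟨rfl, d, hd, ?_⟩
    rw [heq]
    ext <;> simp <;> ring

theorem edge_same_iff (n m : Int) (H : Int × Int → Bool) (a b : Int × Int) (j : Int) :
    EL n m H (a.1, a.2, j) (b.1, b.2, j) ↔ E0 n m H a b := by
  constructor
  · rintro ⟨he, hok, hc⟩
    rw [mem_candL_iff] at hc
    rcases hc with ⟨d, hd, heq⟩ | ⟨_, d, hd, heq⟩
    · refine ⟨he, ⟨hok.1, hok.2⟩, ?_⟩
      rw [mem_cand0_iff]
      refine ⟨d, hd, ?_⟩
      have h1 := congrArg (fun t => t.1) heq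
      have h2 := congrArg (fun t => t.2.1) heq
      simp at h1 h2
      ext <;> simp [h1, h2]
    · have h3 : j = j + 1 := by simpa using congrArg (fun t => t.2.2) heq
      omega
  · rintro ⟨hp, hok, hc⟩
    rw [mem_cand0_iff] at hc
    obtain ⟨d, hd, heq⟩ := hc
    refine ⟨hp, ⟨by simpa [heq] using hok.1, by simpa [heq] using hok.2⟩, ?_⟩
    rw [mem_candL_iff]
    left
    exact ⟨d, hd, by rw [heq]⟩

theorem edge_from0 (n m : Int) (H : Int × Int → Bool) (a : Int × Int) (w : Int × Int × Int)
    (h : EL n m H (a.1, a.2, 0) w) :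
    (w = (w.1, w.2.1, (0 : Int)) ∧ E0 n m H a (w.1, w.2.1)) ∨
      (w = (w.1, w.2.1, (1 : Int)) ∧ JumpE n m H a (w.1, w.2.1)) := by
  obtain ⟨he, hok, hc⟩ := h
  rw [mem_candL_iff] at hc
  rcases hc with ⟨d, hd, heq⟩ | ⟨_, d, hd, heq⟩
  · left
    have h3 := congrArg (fun t => t.2.2) heq
    simp at h3
    refine ⟨by ext <;> simp [h3], ?_⟩
    exact (edge_same_iff n m H a (w.1, w.2.1) 0).1 (by
      rw [show ((w.1, w.2.1, (0:Int))) = w from by ext <;> simp [h3]]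
      exact ⟨he, hok, by rw [mem_candL_iff]; exact Or.inl ⟨d, hd, heq⟩⟩)
  · right
    have h3 := congrArg (fun t => t.2.2) heq
    simp at h3
    refine ⟨by ext <;> simp [h3], ?_⟩
    exact (edge01_iff n m H a (w.1, w.2.1)).1 (by
      rw [show ((w.1, w.2.1, (1:Int))) = w from by ext <;> simp [h3]]
      exact ⟨he, hok, by rw [mem_candL_iff]; exact Or.inr ⟨rfl, d, hd, heq⟩⟩)

theorem edge_from1 (n m : Int) (H : Int × Int → Bool) (a : Int × Int) (w : Int × Int × Int)
    (h : EL n m H (a.1, a.2, 1) w) :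
    w = (w.1, w.2.1, (1 : Int)) ∧ E0 n m H a (w.1, w.2.1) := by
  obtain ⟨he, hok, hc⟩ := h
  rw [mem_candL_iff] at hc
  rcases hc with ⟨d, hd, heq⟩ | ⟨habs, _⟩
  · have h3 := congrArg (fun t => t.2.2) heq
    simp at h3
    refine ⟨by ext <;> simp [h3], ?_⟩
    exact (edge_same_iff n m H a (w.1, w.2.1) 1).1 (by
      rw [show ((w.1, w.2.1, (1:Int))) = w from by ext <;> simp [h3]]
      exact ⟨he, hok, by rw [mem_candL_iff]; exact Or.inl ⟨d, hd, heq⟩⟩)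
  · simp at habs

theorem no_walk_10 (n m : Int) (H : Int × Int → Bool) :
    ∀ (k : Nat) (p r : Int × Int), ¬ PvWalk (EL n m H) (p.1, p.2, 1) (r.1, r.2, 0) k := by
  intro k
  induction k with
  | zero =>
    intro p r h
    have := congrArg (fun t => t.2.2) (pvWalk_zero h)
    simp at this
  | succ k ih =>
    intro p r h
    obtain ⟨z, he, hw⟩ := pvWalk_succ h
    obtain ⟨hz, _⟩ := edge_from1 n m H p z he
    rw [hz] at hw
    exact ih (z.1, z.2.1) r hw

-- walks inside one layer are exactly grid walks
theorem walk_same_iff (n m : Int) (H : Int × Int → Bool) (j : Int) (hj : j = 0 ∨ j = 1) :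
    ∀ (k : Nat) (p r : Int × Int),
      PvWalk (EL n m H) (p.1, p.2, j) (r.1, r.2, j) k ↔ PvWalk (E0 n m H) p r k := by
  intro k
  induction k with
  | zero =>
    intro p r
    constructor
    · intro h
      have := pvWalk_zero h
      have h1 : p = r := by
        have e1 := congrArg (fun t => t.1) this
        have e2 := congrArg (fun t => t.2.1) this
        simp at e1 e2
        ext <;> simp [e1, e2]
      rw [h1]; exact PvWalk.refl r
    · intro h
      rw [pvWalk_zero h]; exact PvWalk.refl _
  | succ k ih =>
    intro p r
    constructor
    · intro h
      obtain ⟨z, he, hw⟩ := pvWalk_succ h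
      rcases hj with hj0 | hj1
      · subst hj0
        rcases edge_from0 n m H p z he with ⟨hz, he0⟩ | ⟨hz, _⟩
        · rw [hz] at hw
          exact PvWalk.cons he0 ((ih (z.1, z.2.1) r).1 hw)
        · rw [hz] at hw
          exact absurd hw (no_walk_10 n m H k (z.1, z.2.1) r)
      · subst hj1
        obtain ⟨hz, he0⟩ := edge_from1 n m H p z he
        rw [hz] at hw
        exact PvWalk.cons he0 ((ih (z.1, z.2.1) r).1 hw)
    · intro h
      obtain ⟨z, he, hw⟩ := pvWalk_succ h
      have heL : EL n m H (p.1, p.2, j) (z.1, z.2, j) := (edge_same_iff n m H p z j).2 he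
      exact PvWalk.cons heL ((ih z r).2 hw)

theorem walk_to1_iff (n m : Int) (H : Int × Int → Bool) :
    ∀ (k : Nat) (p v : Int × Int),
      PvWalk (EL n m H) (p.1, p.2, 0) (v.1, v.2, 1) k ↔
        ∃ u w a b, PvWalk (E0 n m H) p u a ∧ JumpE n m H u w ∧ PvWalk (E0 n m H) w v b ∧
          k = a + 1 + b := by
  intro k
  induction k with
  | zero =>
    intro p v
    constructor
    · intro h
      have := congrArg (fun t => t.2.2) (pvWalk_zero h)
      simp at this
    · rintro ⟨u, w, a, b, _, _, _, habs⟩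
      omega
  | succ k ih =>
    intro p v
    constructor
    · intro h
      obtain ⟨z, he, hw⟩ := pvWalk_succ h
      rcases edge_from0 n m H p z he with ⟨hz, he0⟩ | ⟨hz, hj⟩
      · rw [hz] at hw
        obtain ⟨u, w, a, b, h1, h2, h3, h4⟩ := (ih (z.1, z.2.1) v).1 hw
        exact ⟨u, w, a + 1, b, PvWalk.cons he0 h1, h2, h3, by omega⟩
      · rw [hz] at hw
        have hb := (walk_same_iff n m H 1 (Or.inr rfl) k (z.1, z.2.1) v).1 hw
        exact ⟨p, (z.1, z.2.1), 0, k, PvWalk.refl p, hj, hb, by omega⟩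
    · rintro ⟨u, w, a, b, h1, h2, h3, h4⟩
      have hwa : PvWalk (EL n m H) (p.1, p.2, 0) (u.1, u.2, 0) a :=
        (walk_same_iff n m H 0 (Or.inl rfl) a p u).2 h1
      have hje : EL n m H (u.1, u.2, 0) (w.1, w.2, 1) := (edge01_iff n m H u w).2 h2
      have hwb : PvWalk (EL n m H) (w.1, w.2, 1) (v.1, v.2, 1) b :=
        (walk_same_iff n m H 1 (Or.inr rfl) b w v).2 h3
      have := pvWalk_append hwa (PvWalk.cons hje hwb)
      have hlen : a + (b + 1) = k + 1 := by omega
      rwa [hlen] at this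

theorem E0_symm {n m : Int} {H : Int × Int → Bool} {u v : Int × Int}
    (h : E0 n m H u v) (hu : inGrid n m u) : E0 n m H v u := by
  obtain ⟨he, hok, hc⟩ := h
  refine ⟨hok.2, ⟨hu, he⟩, ?_⟩
  rw [mem_cand0_iff] at hc ⊢
  obtain ⟨d, hd, heq⟩ := hc
  have h1 := congrArg (fun t => t.1) heq
  have h2 := congrArg (fun t => t.2) heq
  simp at h1 h2
  refine ⟨(-d.1, -d.2), ?_, ?_⟩
  · simp [dirsA] at hd ⊢
    rcases hd with h | h | h | h <;> rw [Prod.ext_iff] at h <;> simp at h <;>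
      simp [h.1, h.2] <;> tauto
  · ext <;> simp [h1, h2] <;> ring

theorem walk0_end_inGrid {n m : Int} {H : Int × Int → Bool} {p r : Int × Int} {k : Nat}
    (h : PvWalk (E0 n m H) p r k) (hp : inGrid n m p) : inGrid n m r := by
  induction h with
  | refl => exact hp
  | cons e _ ih => exact ih e.2.1.1

theorem walk0_symm {n m : Int} {H : Int × Int → Bool} :
    ∀ (k : Nat) (p r : Int × Int), inGrid n m p → PvWalk (E0 n m H) p r k →
      PvWalk (E0 n m H) r p k := by
  intro k
  induction k with
  | zero =>
    intro p r _ h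
    rw [pvWalk_zero h]
    exact PvWalk.refl _
  | succ k ih =>
    intro p r hp h
    obtain ⟨z, e, w⟩ := pvWalk_succ h
    exact pvWalk_snoc (ih z r e.2.1.1 w) (E0_symm e hp)

-- marking loops build indicator functions of the wrapped-hole list
theorem fold_mark {β : Type} (g : Int × Int → Int × Int) (one : β) :
    ∀ (l : List (Int × Int)) (f : Int × Int → β) (c : Int × Int),
      (l.foldl (fun f p => fun c => if c = g p then one else f c) f) c =
        if c ∈ l.map g then one else f c := by
  intro l
  induction l with
  | nil => intro f c; simp
  | cons p l ih =>
    intro f c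
    simp only [List.foldl_cons, List.map_cons, List.mem_cons]
    rw [ih]
    by_cases h1 : c ∈ l.map g <;> by_cases h2 : c = g p <;> simp [h1, h2]

-- A's relaxation is the generic one for the layered graph
theorem relaxA_eq (n m : Int) (H : Int × Int → Bool) (p c : Int × Int × Int)
    (s : List (Int × Int × Int) × ((Int × Int × Int) → Int)) :
    relaxAF n m (fun c => if H c = true then 1 else 0) p c s = gRelax (okL n m H) p c s := by
  by_cases hg : okL n m H c ∧ s.2 c = -1
  · rw [gRelax, if_pos hg, relaxAF, if_neg ?_]
    obtain ⟨⟨⟨ha, hb, hc', hd⟩, hH⟩, hv⟩ := hg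
    push_neg
    refine ⟨by omega, by omega, by omega, by omega, by simp [hH], hv⟩
  · rw [gRelax, if_neg hg, relaxAF, if_pos ?_]
    by_contra hno
    push_neg at hno
    obtain ⟨h1, h2, h3, h4, h5, h6⟩ := hno
    refine hg ⟨⟨⟨by omega, by omega, by omega, by omega⟩, ?_⟩, h6⟩
    by_cases hH : H (c.1, c.2.1) = true
    · rw [hH] at h5; simp at h5
    · simpa using hH
  
-- A's loop is the generic loop on the layered graph
theorem solLoop_eq (n m : Int) (H : Int × Int → Bool) :
    ∀ (fuel : Nat) (Q : List (Int × Int × Int)) (vis : (Int × Int × Int) → Int),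
      solLoopF n m (fun c => if H c = true then 1 else 0) fuel Q vis =
        gLoop (expL H) (okL n m H) candL fuel Q vis := by
  intro fuel
  induction fuel with
  | zero => intro Q vis; rfl
  | succ fuel ih =>
    intro Q vis
    match Q with
    | [] => rfl
    | (x, y, j) :: q =>
      by_cases hH : H (x, y) = true
      · have hmp : (if H (x, y) = true then (1:Int) else 0) = 1 := by rw [if_pos hH]
        have hexp : ¬ expL H (x, y, j) := by simp [expL, hH]
        show (if (if H (x, y) = true then (1:Int) else 0) = 1 then _ else _) = _
        rw [if_pos hmp]
        have hgl : gLoop (expL H) (okL n m H) candL (fuel + 1) ((x, y, j) :: q) vis =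
            gLoop (expL H) (okL n m H) candL fuel q vis := by
          show (if expL H (x, y, j) then _ else _) = _
          rw [if_neg hexp]
        rw [hgl]
        exact ih q vis
      · have hmp : ¬ (if H (x, y) = true then (1:Int) else 0) = 1 := by
          rw [if_neg hH]; norm_num
        have hexp : expL H (x, y, j) := by
          show H (x, y) = false
          simpa using hH
        show (if (if H (x, y) = true then (1:Int) else 0) = 1 then _ else _) = _
        rw [if_neg hmp]
        have hgl : gLoop (expL H) (okL n m H) candL (fuel + 1) ((x, y, j) :: q) vis =
            gLoop (expL H) (okL n m H) candL fuel
              ((candL (x, y, j)).foldl (fun s c => gRelax (okL n m H) (x, y, j) c s) (q, vis)).1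
              ((candL (x, y, j)).foldl (fun s c => gRelax (okL n m H) (x, y, j) c s) (q, vis)).2 := by
          show (if expL H (x, y, j) then _ else _) = _
          rw [if_pos hexp]
        rw [hgl]
        have hfold1 : ∀ (s0 : List (Int × Int × Int) × ((Int × Int × Int) → Int)),
            dirsA.foldl (fun s d => relaxAF n m (fun c => if H c = true then 1 else 0)
              (x, y, j) (x + d.1, y + d.2, j) s) s0 =
            (dirsA.map (fun d => (x + d.1, y + d.2, j))).foldl
              (fun s c => gRelax (okL n m H) (x, y, j) c s) s0 := by
          intro s0
          rw [List.foldl_map]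
          simp only [relaxA_eq]
        have hfold2 : ∀ (s0 : List (Int × Int × Int) × ((Int × Int × Int) → Int)),
            dirsA.foldl (fun s d => relaxAF n m (fun c => if H c = true then 1 else 0)
              (x, y, j) (x + d.1 * 2, y + d.2 * 2, j + 1) s) s0 =
            (dirsA.map (fun d => (x + d.1 * 2, y + d.2 * 2, j + 1))).foldl
              (fun s c => gRelax (okL n m H) (x, y, j) c s) s0 := by
          intro s0
          rw [List.foldl_map]
          simp only [relaxA_eq]
        by_cases hj : j = 0
        · subst hj
          have hne : ¬ ((0:Int) ≠ 0) := by simp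
          have hc : candL (x, y, (0:Int)) =
              dirsA.map (fun d => (x + d.1, y + d.2, (0:Int))) ++
                dirsA.map (fun d => (x + d.1 * 2, y + d.2 * 2, (0:Int) + 1)) := by
            simp [candL]
          rw [hc, List.foldl_append]
          simp only [hne, if_false, hfold1, hfold2]
          exact ih _ _
        · have hne : (j ≠ 0) := hj
          have hc : candL (x, y, j) =
              dirsA.map (fun d => (x + d.1, y + d.2, j)) ++ ([] : List (Int × Int × Int)) := by
            simp [candL, hj]
          rw [hc, List.foldl_append]
          simp only [hfold1, List.foldl_nil]
          simp only [ne_eq, hj, not_false_eq_true, if_true]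
          exact ih _ _

-- B's relaxation is the generic one for the grid graph (dist values never below -1)
theorem relaxBfs_eq (n m : Int) (H : Int × Int → Bool) (p c : Int × Int)
    (s : List (Int × Int) × ((Int × Int) → Int)) (hb : ∀ v, -1 ≤ s.2 v) :
    relaxBfsF n m H p c s = gRelax (ok0 n m H) p c s := by
  by_cases hg : ok0 n m H c ∧ s.2 c = -1
  · rw [gRelax, if_pos hg, relaxBfsF, if_pos ?_]
    obtain ⟨⟨⟨ha, hb', hc', hd⟩, hH⟩, hv⟩ := hg
    exact ⟨ha, hb', hc', hd, hH, by omega⟩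
  · rw [gRelax, if_neg hg, relaxBfsF, if_neg ?_]
    rintro ⟨h1, h2, h3, h4, h5, h6⟩
    exact hg ⟨⟨⟨h1, h2, h3, h4⟩, h5⟩, by have := hb c; omega⟩

theorem gRelax_bound {α : Type} [DecidableEq α] (ok : α → Prop) [DecidablePred ok] (p c : α)
    (s : List α × (α → Int)) (hb : ∀ v, -1 ≤ s.2 v) : ∀ v, -1 ≤ (gRelax ok p c s).2 v := by
  intro v
  rw [gRelax]
  split_ifs with h
  · simp only
    split_ifs with h2
    · have := hb p; omega
    · exact hb v
  · exact hb v

theorem bfs_fold_eq (n m : Int) (H : Int × Int → Bool) (p : Int × Int) :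
    ∀ (ds : List (Int × Int)) (s : List (Int × Int) × ((Int × Int) → Int))
      (hb : ∀ v, -1 ≤ s.2 v),
      ds.foldl (fun s d => relaxBfsF n m H p (p.1 + d.1, p.2 + d.2) s) s =
        ds.foldl (fun s d => gRelax (ok0 n m H) p (p.1 + d.1, p.2 + d.2) s) s ∧
      ∀ v, -1 ≤ (ds.foldl (fun s d => gRelax (ok0 n m H) p (p.1 + d.1, p.2 + d.2) s) s).2 v := by
  intro ds
  induction ds with
  | nil => intro s hb; exact ⟨rfl, hb⟩
  | cons d ds ih =>
    intro s hb
    have h1 : relaxBfsF n m H p (p.1 + d.1, p.2 + d.2) s =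
        gRelax (ok0 n m H) p (p.1 + d.1, p.2 + d.2) s := relaxBfs_eq n m H p _ s hb
    have hb' := gRelax_bound (ok0 n m H) p (p.1 + d.1, p.2 + d.2) s hb
    obtain ⟨e, b⟩ := ih (gRelax (ok0 n m H) p (p.1 + d.1, p.2 + d.2) s) hb'
    constructor
    · simp only [List.foldl_cons, h1]
      exact e
    · simpa only [List.foldl_cons] using b

-- B's bfs loop is the generic loop on the grid graph
theorem bfsLoop_eq (n m : Int) (H : Int × Int → Bool) :
    ∀ (fuel : Nat) (Q : List (Int × Int)) (vis : (Int × Int) → Int),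
      (∀ v, -1 ≤ vis v) →
      bfsLoopF n m H fuel Q vis = gLoop (exp0 H) (ok0 n m H) cand0 fuel Q vis := by
  intro fuel
  induction fuel with
  | zero => intro Q vis _; rfl
  | succ fuel ih =>
    intro Q vis hb
    match Q with
    | [] => rfl
    | (x, y) :: q =>
      by_cases hH : H (x, y) = true
      · have hexp : ¬ exp0 H (x, y) := by simp [exp0, hH]
        show (if H (x, y) = true then _ else _) = _
        rw [if_pos hH]
        have hgl : gLoop (exp0 H) (ok0 n m H) cand0 (fuel + 1) ((x, y) :: q) vis =
            gLoop (exp0 H) (ok0 n m H) cand0 fuel q vis := by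
          show (if exp0 H (x, y) then _ else _) = _
          rw [if_neg hexp]
        rw [hgl]
        exact ih q vis hb
      · have hexp : exp0 H (x, y) := by show H (x, y) = false; simpa using hH
        show (if H (x, y) = true then _ else _) = _
        rw [if_neg hH]
        have hgl : gLoop (exp0 H) (ok0 n m H) cand0 (fuel + 1) ((x, y) :: q) vis =
            gLoop (exp0 H) (ok0 n m H) cand0 fuel
              ((cand0 (x, y)).foldl (fun s c => gRelax (ok0 n m H) (x, y) c s) (q, vis)).1
              ((cand0 (x, y)).foldl (fun s c => gRelax (ok0 n m H) (x, y) c s) (q, vis)).2 := by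
          show (if exp0 H (x, y) then _ else _) = _
          rw [if_pos hexp]
        rw [hgl]
        have hmap : (cand0 (x, y)).foldl (fun s c => gRelax (ok0 n m H) (x, y) c s) (q, vis) =
            dirsB.foldl (fun s d => gRelax (ok0 n m H) (x, y) ((x, y).1 + d.1, (x, y).2 + d.2) s)
              (q, vis) := by
          rw [cand0, List.foldl_map]
        obtain ⟨e, b⟩ := bfs_fold_eq n m H (x, y) dirsB (q, vis) hb
        rw [hmap, ← e]
        rw [e]
        exact ih _ _ b

noncomputable def S0 (n m : Int) : Finset (Int × Int) := Finset.Icc 0 (n - 1) ×ˢ Finset.Icc 0 (m - 1)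
noncomputable def SL (n m : Int) : Finset (Int × Int × Int) :=
  Finset.Icc 0 (n - 1) ×ˢ (Finset.Icc 0 (m - 1) ×ˢ ({0, 1} : Finset Int))

theorem mem_S0 (n m : Int) (c : Int × Int) : c ∈ S0 n m ↔ inGrid n m c := by
  simp [S0, Finset.mem_product, Finset.mem_Icc, inGrid]
  omega

theorem mem_SL (n m : Int) (v : Int × Int × Int) :
    v ∈ SL n m ↔ inGrid n m (v.1, v.2.1) ∧ (v.2.2 = 0 ∨ v.2.2 = 1) := by
  simp [SL, Finset.mem_product, Finset.mem_Icc, inGrid]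
  omega

theorem S0_card (n m : Int) : (S0 n m).card = n.toNat * m.toNat := by
  simp [S0, Finset.card_product, Int.card_Icc]

theorem SL_card (n m : Int) : (SL n m).card = n.toNat * (m.toNat * 2) := by
  have h2 : ({0, 1} : Finset Int).card = 2 := by decide
  simp [SL, Finset.card_product, Int.card_Icc, h2]

theorem closure0 (n m : Int) (H : Int × Int → Bool) :
    ∀ u v, u ∈ S0 n m → ok0 n m H v → v ∈ cand0 u → v ∈ S0 n m := by
  intro u v _ hok _
  rw [mem_S0]
  exact hok.1

theorem closureL (n m : Int) (H : Int × Int → Bool) :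
    ∀ u v, u ∈ SL n m → okL n m H v → v ∈ candL u → v ∈ SL n m := by
  intro u v hu hok hc
  rw [mem_SL] at hu ⊢
  refine ⟨hok.1, ?_⟩
  rw [mem_candL_iff] at hc
  rcases hc with ⟨d, _, heq⟩ | ⟨h0, d, _, heq⟩
  · have := congrArg (fun t => t.2.2) heq
    simp at this
    omega
  · have := congrArg (fun t => t.2.2) heq
    simp at this
    omega

theorem FA_isBFS (n m : Int) (H : Int × Int → Bool) (hn : 1 ≤ n) (hm : 1 ≤ m) :
    IsBFS (EL n m H) (0, 0, 0)
      (solLoopF n m (fun c => if H c = true then 1 else 0) (2 * n.toNat * m.toNat + 2)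
        [(0, 0, 0)] (fun v => if v = (0, 0, 0) then 0 else -1)) := by
  rw [solLoop_eq]
  exact gLoop_isBFS (closureL n m H)
    (by rw [mem_SL]; simp [inGrid]; omega) _
    (by rw [SL_card]
        have h : n.toNat * (m.toNat * 2) = 2 * n.toNat * m.toNat := by ring
        omega)

theorem FB_isBFS (n m : Int) (H : Int × Int → Bool) (sx sy : Int)
    (hs : inGrid n m (sx, sy)) :
    IsBFS (E0 n m H) (sx, sy) (bfsBF n m H sx sy) := by
  rw [bfsBF, bfsLoop_eq n m H _ _ _ (by intro v; split_ifs <;> omega)]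
  exact gLoop_isBFS (closure0 n m H) (by rw [mem_S0]; exact hs) _ (by rw [S0_card]; omega)

-- running minimum (with -1 = "empty so far") over a filtered list
theorem minfold {β : Type} (Pb : β → Prop) [DecidablePred Pb] (val : β → Int)
    (hval : ∀ t, Pb t → 0 ≤ val t) :
    ∀ (L : List β) (acc : Int), (acc = -1 ∨ 0 ≤ acc) →
      ((∀ t ∈ L, ¬ Pb t) →
        L.foldl (fun acc t => if Pb t then
          (if acc < 0 ∨ val t < acc then val t else acc) else acc) acc = acc) ∧
      (L.foldl (fun acc t => if Pb t then
          (if acc < 0 ∨ val t < acc then val t else acc) else acc) acc = acc ∨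
        ∃ t ∈ L, Pb t ∧ L.foldl (fun acc t => if Pb t then
          (if acc < 0 ∨ val t < acc then val t else acc) else acc) acc = val t) ∧
      (∀ t ∈ L, Pb t → L.foldl (fun acc t => if Pb t then
          (if acc < 0 ∨ val t < acc then val t else acc) else acc) acc ≤ val t) ∧
      (0 ≤ acc → L.foldl (fun acc t => if Pb t then
          (if acc < 0 ∨ val t < acc then val t else acc) else acc) acc ≤ acc) ∧
      ((∃ t ∈ L, Pb t) → 0 ≤ L.foldl (fun acc t => if Pb t then
          (if acc < 0 ∨ val t < acc then val t else acc) else acc) acc) := by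
  intro L
  induction L with
  | nil =>
    intro acc hacc
    refine ⟨fun _ => rfl, Or.inl rfl, by simp, fun _ => le_refl _, ?_⟩
    rintro ⟨t, ht, _⟩
    simp at ht
  | cons t L ih =>
    intro acc hacc
    by_cases hP : Pb t
    · have hv := hval t hP
      set acc' := if acc < 0 ∨ val t < acc then val t else acc with hacc'
      have hacc'0 : 0 ≤ acc' := by
        rw [hacc']
        split_ifs with h
        · exact hv
        · push_neg at h
          omega
      have hstep : (if Pb t then (if acc < 0 ∨ val t < acc then val t else acc) else acc) = acc' := by
        rw [if_pos hP]
      obtain ⟨ihA, ihB, ihC, ihD, _⟩ := ih acc' (Or.inr hacc'0)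
      simp only [List.foldl_cons, hstep]
      refine ⟨?_, ?_, ?_, ?_, ?_⟩
      · intro h
        exact absurd hP (h t (by simp))
      · rcases ihB with h | ⟨t', ht', hPt', heq⟩
        · rw [h, hacc']
          split_ifs with h2
          · exact Or.inr ⟨t, by simp, hP, rfl⟩
          · exact Or.inl rfl
        · exact Or.inr ⟨t', by simp [ht'], hPt', heq⟩
      · intro t' ht' hPt'
        rcases List.mem_cons.1 ht' with rfl | ht''
        · have h1 := ihD hacc'0
          have h2 : acc' ≤ val t' := by
            rw [hacc']
            split_ifs with h3
            · exact le_refl _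
            · push_neg at h3
              exact h3.2
          omega
        · exact ihC t' ht'' hPt'
      · intro h0
        have h1 := ihD hacc'0
        have h2 : acc' ≤ acc := by
          rw [hacc']
          split_ifs with h3
          · rcases h3 with h3 | h3 <;> omega
          · exact le_refl _
        omega
      · intro _
        rcases ihB with h | ⟨t', _, hPt', heq⟩
        · rw [h]; exact hacc'0
        · rw [heq]; exact hval t' hPt'
    · have hstep : (if Pb t then (if acc < 0 ∨ val t < acc then val t else acc) else acc) = acc := by
        rw [if_neg hP]
      obtain ⟨ihA, ihB, ihC, ihD, ihE⟩ := ih acc hacc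
      simp only [List.foldl_cons, hstep]
      refine ⟨fun h => ihA (fun t' ht' => h t' (by simp [ht'])), ?_, ?_, ihD, ?_⟩
      · rcases ihB with h | ⟨t', ht', hPt', heq⟩
        · exact Or.inl h
        · exact Or.inr ⟨t', by simp [ht'], hPt', heq⟩
      · intro t' ht' hPt'
        rcases List.mem_cons.1 ht' with rfl | ht''
        · exact absurd hPt' hP
        · exact ihC t' ht'' hPt'
      · rintro ⟨t', ht', hPt'⟩
        rcases List.mem_cons.1 ht' with rfl | ht''
        · exact absurd hPt' hP
        · exact ihE ⟨t', ht'', hPt'⟩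

-- the scanned triples of B's jump scan, flattened, with guard and value
def tgtOf (t : Int × Int × (Int × Int)) : Int × Int :=
  (t.1 + 2 * t.2.2.1, t.2.1 + 2 * t.2.2.2)

abbrev PT (n m : Int) (H : Int × Int → Bool) (dS dE : (Int × Int) → Int)
    (t : Int × Int × (Int × Int)) : Prop :=
  ¬ (H (t.1, t.2.1) = true ∨ dS (t.1, t.2.1) < 0) ∧
    (0 ≤ (tgtOf t).1 ∧ (tgtOf t).1 < n ∧ 0 ≤ (tgtOf t).2 ∧ (tgtOf t).2 < m ∧
      H (tgtOf t) = false ∧ 0 ≤ dE (tgtOf t))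

def valT (dS dE : (Int × Int) → Int) (t : Int × Int × (Int × Int)) : Int :=
  dS (t.1, t.2.1) + 1 + dE (tgtOf t)

def trip (n m : Int) : List (Int × Int × (Int × Int)) :=
  (PySem.List.pyRange 0 n 1).flatMap (fun x =>
    (PySem.List.pyRange 0 m 1).flatMap (fun y => dirsB.map (fun d => (x, y, d))))

theorem foldl_skipP {β : Type} (Pb : β → Prop) [DecidablePred Pb] (val : β → Int)
    (l : List β) (h : ∀ t ∈ l, ¬ Pb t) :
    ∀ acc, l.foldl (fun acc t => if Pb t then
      (if acc < 0 ∨ val t < acc then val t else acc) else acc) acc = acc := by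
  induction l with
  | nil => intro acc; rfl
  | cons t l ih =>
    intro acc
    rw [List.foldl_cons, if_neg (h t (by simp))]
    exact ih (fun t' ht' => h t' (by simp [ht'])) acc

theorem jumpMin_eq_flat (n m : Int) (H : Int × Int → Bool) (dS dE : (Int × Int) → Int) :
    jumpMinF n m H dS dE = (trip n m).foldl (fun acc t => if PT n m H dS dE t then
      (if acc < 0 ∨ valT dS dE t < acc then valT dS dE t else acc) else acc) (-1) := by
  rw [jumpMinF, trip, List.foldl_flatMap]
  refine PySem.List.foldl_congr_mem _ _ _ _ (fun acc x _ => ?_)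
  rw [List.foldl_flatMap]
  refine PySem.List.foldl_congr_mem _ _ _ _ (fun acc2 y _ => ?_)
  by_cases hskip : H (x, y) = true ∨ dS (x, y) < 0
  · rw [if_pos hskip]
    rw [foldl_skipP (PT n m H dS dE) (valT dS dE) _ ?_ acc2]
    intro t ht hPt
    obtain ⟨d, _, rfl⟩ := List.mem_map.1 ht
    exact hPt.1 hskip
  · rw [if_neg hskip, List.foldl_map]
    refine PySem.List.foldl_congr_mem _ _ _ _ (fun acc3 d _ => ?_)
    show _ = (if PT n m H dS dE (x, y, d) then _ else _)
    by_cases htgt : 0 ≤ x + 2 * d.1 ∧ x + 2 * d.1 < n ∧ 0 ≤ y + 2 * d.2 ∧ y + 2 * d.2 < m ∧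
        H (x + 2 * d.1, y + 2 * d.2) = false ∧ 0 ≤ dE (x + 2 * d.1, y + 2 * d.2)
    · rw [if_pos htgt, if_pos (⟨hskip, htgt⟩ : PT n m H dS dE (x, y, d))]
      rfl
    · rw [if_neg htgt, if_neg ?_]
      rintro ⟨_, h2⟩
      exact htgt h2

theorem dirsB_eq_dirsA : dirsB = dirsA := rfl

-- every admissible scan triple yields a layered walk of length exactly its value …
theorem bridge1 (n m : Int) (H : Int × Int → Bool) (FS FE : (Int × Int) → Int)
    (hn : 1 ≤ n) (hm : 1 ≤ m)
    (hFS : IsBFS (E0 n m H) (0, 0) FS) (hFE : IsBFS (E0 n m H) (n - 1, m - 1) FE)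
    (t : Int × Int × (Int × Int)) (ht : t ∈ trip n m) (hP : PT n m H FS FE t) :
    ∃ kk : Nat, PvWalk (EL n m H) (0, 0, 0) (n - 1, m - 1, 1) kk ∧ valT FS FE t = (kk : Int) := by
  obtain ⟨hu, htg⟩ := hP
  push_neg at hu
  obtain ⟨a, ha, hwa, _⟩ := (hFS (t.1, t.2.1)).resolve_left
    (by rintro ⟨_, he⟩; have h2 := hu.2; rw [he] at h2; omega)
  obtain ⟨b, hb, hwb, _⟩ := (hFE (tgtOf t)).resolve_left
    (by rintro ⟨_, he⟩; rw [he] at htg; omega)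
  have hj : JumpE n m H (t.1, t.2.1) (tgtOf t) := by
    refine ⟨by simpa using hu.1, ⟨htg.1, htg.2.1, htg.2.2.1, htg.2.2.2.1⟩,
      htg.2.2.2.2.1, t.2.2, ?_, rfl⟩
    rw [trip] at ht
    obtain ⟨x, _, ht1⟩ := List.mem_flatMap.1 ht
    obtain ⟨y, _, ht2⟩ := List.mem_flatMap.1 ht1
    obtain ⟨d, hd, ht3⟩ := List.mem_map.1 ht2
    rw [← ht3, ← dirsB_eq_dirsA]
    exact hd
  have hsym : PvWalk (E0 n m H) (tgtOf t) (n - 1, m - 1) b :=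
    walk0_symm b (n - 1, m - 1) (tgtOf t) ⟨by omega, by omega, by omega, by omega⟩ hwb
  have hwalk := (walk_to1_iff n m H (a + 1 + b) ((0 : Int), (0 : Int)) ((n - 1), (m - 1))).2
    ⟨(t.1, t.2.1), tgtOf t, a, b, hwa, hj, hsym, rfl⟩
  refine ⟨a + 1 + b, hwalk, ?_⟩
  rw [valT, ha, hb]
  push_cast
  ring

-- … and every layered walk to the goal yields an admissible triple of value ≤ its length
theorem bridge2 (n m : Int) (H : Int × Int → Bool) (FS FE : (Int × Int) → Int)
    (hn : 1 ≤ n) (hm : 1 ≤ m)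
    (hFS : IsBFS (E0 n m H) (0, 0) FS) (hFE : IsBFS (E0 n m H) (n - 1, m - 1) FE)
    (k : Nat) (hw : PvWalk (EL n m H) (0, 0, 0) (n - 1, m - 1, 1) k) :
    ∃ t ∈ trip n m, PT n m H FS FE t ∧ valT FS FE t ≤ (k : Int) := by
  obtain ⟨u, w, a, b, hwa, hj, hwb, hk⟩ :=
    (walk_to1_iff n m H k ((0 : Int), (0 : Int)) ((n - 1), (m - 1))).1 hw
  obtain ⟨hHu, hwgrid, hHw, d, hd, hweq⟩ := hj
  have hugrid : inGrid n m u :=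
    walk0_end_inGrid hwa ⟨le_refl 0, by omega, le_refl 0, by omega⟩
  obtain ⟨aa, haa, _, hamin⟩ := (hFS u).resolve_left
    (by rintro ⟨hno, _⟩; exact absurd hwa (hno a))
  have hsym : PvWalk (E0 n m H) (n - 1, m - 1) w b :=
    walk0_symm b w (n - 1, m - 1) hwgrid hwb
  obtain ⟨bb, hbb, _, hbmin⟩ := (hFE w).resolve_left
    (by rintro ⟨hno, _⟩; exact absurd hsym (hno b))
  have htg : tgtOf (u.1, u.2, d) = w := by simp [tgtOf, hweq]
  refine ⟨(u.1, u.2, d), ?_, ?_, ?_⟩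
  · rw [trip]
    refine List.mem_flatMap.2 ⟨u.1, ?_, List.mem_flatMap.2 ⟨u.2, ?_, List.mem_map.2 ⟨d, ?_, rfl⟩⟩⟩
    · rw [PySem.List.mem_pyRange_one]
      exact ⟨hugrid.1, hugrid.2.1⟩
    · rw [PySem.List.mem_pyRange_one]
      exact ⟨hugrid.2.2.1, hugrid.2.2.2⟩
    · rw [dirsB_eq_dirsA]
      exact hd
  · refine ⟨?_, ?_⟩
    · push_neg
      refine ⟨by simpa using hHu, ?_⟩
      show (0 : Int) ≤ FS u
      rw [haa]
      omega
    · show 0 ≤ (tgtOf (u.1, u.2, d)).1 ∧ _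
      rw [htg]
      exact ⟨hwgrid.1, hwgrid.2.1, hwgrid.2.2.1, hwgrid.2.2.2, hHw, by rw [hbb]; omega⟩
  · have hv : valT FS FE (u.1, u.2, d) = FS u + 1 + FE w := by
      rw [valT, htg]
    rw [hv, haa, hbb]
    have h1 : aa ≤ a := hamin a hwa
    have h2 : bb ≤ b := hbmin b hsym
    have : k = a + 1 + b := hk
    omega

theorem jump_eq (n m : Int) (H : Int × Int → Bool) (FA : (Int × Int × Int) → Int)
    (FS FE : (Int × Int) → Int) (hn : 1 ≤ n) (hm : 1 ≤ m)
    (hFA : IsBFS (EL n m H) (0, 0, 0) FA)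
    (hFS : IsBFS (E0 n m H) (0, 0) FS)
    (hFE : IsBFS (E0 n m H) (n - 1, m - 1) FE) :
    jumpMinF n m H FS FE = FA (n - 1, m - 1, 1) := by
  rw [jumpMin_eq_flat]
  have hval : ∀ t, PT n m H FS FE t → 0 ≤ valT FS FE t := by
    intro t ht
    obtain ⟨h1, h2⟩ := ht
    push_neg at h1
    rw [valT]
    have := h2.2.2.2.2.2
    omega
  obtain ⟨cA, cB, cC, _, cE⟩ := minfold (PT n m H FS FE) (valT FS FE) hval (trip n m) (-1)
    (Or.inl rfl)
  rcases hFA (n - 1, m - 1, 1) with ⟨hnone, heq⟩ | ⟨k, hk, hw, hmin⟩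
  · rw [heq]
    refine cA ?_
    intro t ht hP
    obtain ⟨kk, hwalk, _⟩ := bridge1 n m H FS FE hn hm hFS hFE t ht hP
    exact hnone kk hwalk
  · obtain ⟨t0, ht0, hP0, hv0⟩ := bridge2 n m H FS FE hn hm hFS hFE k hw
    have hr0 : 0 ≤ (trip n m).foldl (fun acc t => if PT n m H FS FE t then
        (if acc < 0 ∨ valT FS FE t < acc then valT FS FE t else acc) else acc) (-1) :=
      cE ⟨t0, ht0, hP0⟩
    rcases cB with hB | ⟨t1, ht1, hP1, heq1⟩
    · rw [hB] at hr0; omega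
    · obtain ⟨kk, hwalk, hvk⟩ := bridge1 n m H FS FE hn hm hFS hFE t1 ht1 hP1
      have hge : k ≤ kk := hmin kk hwalk
      have hle := cC t0 ht0 hP0
      rw [hk, heq1, hvk]
      omega


-- ===== bridging the HashMap stores of the ports to the function layer =====
def RelH {K : Type} [BEq K] [Hashable K] (hm : Std.HashMap K Int) (f : K → Int) : Prop :=
  ∀ v, hm.getD v (-1) = f v

theorem initRelH {K : Type} [BEq K] [LawfulBEq K] [Hashable K] [DecidableEq K] (s : K) :
    RelH (Std.HashMap.emptyWithCapacity.insert s 0) (fun v => if v = s then 0 else -1) := by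
  intro v
  rw [Std.HashMap.getD_insert, Std.HashMap.getD_emptyWithCapacity]
  by_cases h : v = s
  · subst h; simp
  · have hb : (s == v) = false := beq_eq_false_iff_ne.2 (Ne.symm h)
    simp [hb, h]

theorem insertRelH {K : Type} [BEq K] [LawfulBEq K] [Hashable K] [DecidableEq K]
    (hm : Std.HashMap K Int) (f : K → Int) (hrel : RelH hm f) (c : K) (w : Int) :
    RelH (hm.insert c w) (fun v => if v = c then w else f v) := by
  intro v
  rw [Std.HashMap.getD_insert]
  by_cases h : v = c
  · subst h; simp
  · have hb : (c == v) = false := beq_eq_false_iff_ne.2 (Ne.symm h)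
    simp [hb, h, hrel v]

theorem relaxA_bridge (n m : Int) (mp : Int × Int → Int) (p c : Int × Int × Int)
    (sH : List (Int × Int × Int) × Std.HashMap (Int × Int × Int) Int)
    (sF : List (Int × Int × Int) × ((Int × Int × Int) → Int))
    (hq : sH.1 = sF.1) (hrel : RelH sH.2 sF.2) :
    (relaxA n m mp p c sH).1 = (relaxAF n m mp p c sF).1 ∧
      RelH (relaxA n m mp p c sH).2 (relaxAF n m mp p c sF).2 := by
  rw [relaxA, relaxAF, hrel c]
  split_ifs with h
  · exact ⟨hq, hrel⟩
  · refine ⟨by rw [hq], ?_⟩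
    simp only
    rw [hrel p]
    exact insertRelH sH.2 sF.2 hrel c (sF.2 p + 1)

theorem foldA_bridge (n m : Int) (mp : Int × Int → Int) (p : Int × Int × Int)
    (g : Int × Int → Int × Int × Int) :
    ∀ (ds : List (Int × Int))
      (sH : List (Int × Int × Int) × Std.HashMap (Int × Int × Int) Int)
      (sF : List (Int × Int × Int) × ((Int × Int × Int) → Int)),
      sH.1 = sF.1 → RelH sH.2 sF.2 →
      (ds.foldl (fun s d => relaxA n m mp p (g d) s) sH).1 =
        (ds.foldl (fun s d => relaxAF n m mp p (g d) s) sF).1 ∧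
      RelH (ds.foldl (fun s d => relaxA n m mp p (g d) s) sH).2
        (ds.foldl (fun s d => relaxAF n m mp p (g d) s) sF).2 := by
  intro ds
  induction ds with
  | nil => intro sH sF hq hrel; exact ⟨hq, hrel⟩
  | cons d ds ih =>
    intro sH sF hq hrel
    obtain ⟨hq', hrel'⟩ := relaxA_bridge n m mp p (g d) sH sF hq hrel
    simpa only [List.foldl_cons] using ih _ _ hq' hrel'

theorem solLoop_bridge (n m : Int) (mp : Int × Int → Int) :
    ∀ (fuel : Nat) (Q : List (Int × Int × Int)) (hm : Std.HashMap (Int × Int × Int) Int)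
      (f : (Int × Int × Int) → Int), RelH hm f →
      RelH (solLoop n m mp fuel Q hm) (solLoopF n m mp fuel Q f) := by
  intro fuel
  induction fuel with
  | zero => intro Q hm f hrel; exact hrel
  | succ fuel ih =>
    intro Q hm f hrel
    match Q with
    | [] => exact hrel
    | (x, y, j) :: q =>
      show RelH (if mp (x, y) = 1 then _ else _) (if mp (x, y) = 1 then _ else _)
      by_cases hmpv : mp (x, y) = 1
      · rw [if_pos hmpv, if_pos hmpv]
        exact ih q hm f hrel
      · rw [if_neg hmpv, if_neg hmpv]
        obtain ⟨hq1, hrel1⟩ := foldA_bridge n m mp (x, y, j) (fun d => (x + d.1, y + d.2, j))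
          dirsA (q, hm) (q, f) rfl hrel
        by_cases hj : j = 0
        · subst hj
          have hne : ¬ ((0 : Int) ≠ 0) := by simp
          simp only [hne, if_false]
          obtain ⟨hq2, hrel2⟩ := foldA_bridge n m mp (x, y, 0)
            (fun d => (x + d.1 * 2, y + d.2 * 2, 0 + 1)) dirsA _ _ hq1 hrel1
          rw [hq2]
          exact ih _ _ _ hrel2
        · simp only [ne_eq, hj, not_false_eq_true, if_true]
          rw [hq1]
          exact ih _ _ _ hrel1

theorem relaxB_bridge (n m : Int) (bl : Int × Int → Bool) (p c : Int × Int)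
    (sH : List (Int × Int) × Std.HashMap (Int × Int) Int)
    (sF : List (Int × Int) × ((Int × Int) → Int))
    (hq : sH.1 = sF.1) (hrel : RelH sH.2 sF.2) :
    (relaxBfs n m bl p c sH).1 = (relaxBfsF n m bl p c sF).1 ∧
      RelH (relaxBfs n m bl p c sH).2 (relaxBfsF n m bl p c sF).2 := by
  rw [relaxBfs, relaxBfsF, hrel c]
  split_ifs with h
  · refine ⟨by rw [hq], ?_⟩
    simp only
    rw [hrel p]
    exact insertRelH sH.2 sF.2 hrel c (sF.2 p + 1)
  · exact ⟨hq, hrel⟩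

theorem foldB_bridge (n m : Int) (bl : Int × Int → Bool) (p : Int × Int)
    (g : Int × Int → Int × Int) :
    ∀ (ds : List (Int × Int))
      (sH : List (Int × Int) × Std.HashMap (Int × Int) Int)
      (sF : List (Int × Int) × ((Int × Int) → Int)),
      sH.1 = sF.1 → RelH sH.2 sF.2 →
      (ds.foldl (fun s d => relaxBfs n m bl p (g d) s) sH).1 =
        (ds.foldl (fun s d => relaxBfsF n m bl p (g d) s) sF).1 ∧
      RelH (ds.foldl (fun s d => relaxBfs n m bl p (g d) s) sH).2
        (ds.foldl (fun s d => relaxBfsF n m bl p (g d) s) sF).2 := by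
  intro ds
  induction ds with
  | nil => intro sH sF hq hrel; exact ⟨hq, hrel⟩
  | cons d ds ih =>
    intro sH sF hq hrel
    obtain ⟨hq', hrel'⟩ := relaxB_bridge n m bl p (g d) sH sF hq hrel
    simpa only [List.foldl_cons] using ih _ _ hq' hrel'

theorem bfsLoop_bridge (n m : Int) (bl : Int × Int → Bool) :
    ∀ (fuel : Nat) (Q : List (Int × Int)) (hm : Std.HashMap (Int × Int) Int)
      (f : (Int × Int) → Int), RelH hm f →
      RelH (bfsLoop n m bl fuel Q hm) (bfsLoopF n m bl fuel Q f) := by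
  intro fuel
  induction fuel with
  | zero => intro Q hm f hrel; exact hrel
  | succ fuel ih =>
    intro Q hm f hrel
    match Q with
    | [] => exact hrel
    | (x, y) :: q =>
      show RelH (if bl (x, y) = true then _ else _) (if bl (x, y) = true then _ else _)
      by_cases hb : bl (x, y) = true
      · rw [if_pos hb, if_pos hb]
        exact ih q hm f hrel
      · rw [if_neg hb, if_neg hb]
        obtain ⟨hq1, hrel1⟩ := foldB_bridge n m bl (x, y) (fun d => (x + d.1, y + d.2))
          dirsB (q, hm) (q, f) rfl hrel
        show RelH
          (bfsLoop n m bl fuel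
            (dirsB.foldl (fun s d => relaxBfs n m bl (x, y) (x + d.1, y + d.2) s) (q, hm)).1
            (dirsB.foldl (fun s d => relaxBfs n m bl (x, y) (x + d.1, y + d.2) s) (q, hm)).2)
          (bfsLoopF n m bl fuel
            (dirsB.foldl (fun s d => relaxBfsF n m bl (x, y) (x + d.1, y + d.2) s) (q, f)).1
            (dirsB.foldl (fun s d => relaxBfsF n m bl (x, y) (x + d.1, y + d.2) s) (q, f)).2)
        rw [hq1]
        exact ih _ _ _ hrel1

theorem bfsB_bridge (n m : Int) (bl : Int × Int → Bool) (sx sy : Int) :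
    RelH (bfsB n m bl sx sy) (bfsBF n m bl sx sy) :=
  bfsLoop_bridge n m bl _ _ _ _ (initRelH (sx, sy))

theorem jumpMin_bridge (n m : Int) (bl : Int × Int → Bool)
    (hmS hmE : Std.HashMap (Int × Int) Int) (fS fE : (Int × Int) → Int)
    (hS : RelH hmS fS) (hE : RelH hmE fE) :
    jumpMin n m bl hmS hmE = jumpMinF n m bl fS fE := by
  unfold RelH at hS hE
  rw [jumpMin, jumpMinF]
  refine PySem.List.foldl_congr_mem _ _ _ _ (fun acc x _ => ?_)
  refine PySem.List.foldl_congr_mem _ _ _ _ (fun acc2 y _ => ?_)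
  simp only [hS, hE]

theorem solution_eq_alt (n m : Int) (hole : List (Int × Int)) (hn : 1 ≤ n) (hm : 1 ≤ m) :
    solution n m hole = solution_alt n m hole := by
  set wh := hole.map (fun p => (wrapA n (p.1 - 1), wrapA m (p.2 - 1))) with hwh
  set H : Int × Int → Bool := fun c => decide (c ∈ wh) with hH
  have hmp : (hole.foldl (fun f p => fun c =>
      if c = (wrapA n (p.1 - 1), wrapA m (p.2 - 1)) then 1 else f c) (fun _ => (0 : Int))) =
      fun c => if H c = true then 1 else 0 := by
    funext c
    rw [fold_mark (fun p => (wrapA n (p.1 - 1), wrapA m (p.2 - 1))) (1 : Int) hole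
      (fun _ => 0) c, ← hwh]
    by_cases h : c ∈ wh <;> simp [hH, h]
  have hbl : (hole.foldl (fun f p => fun c =>
      if c = (wrapB n (p.1 - 1), wrapB m (p.2 - 1)) then true else f c) (fun _ => false)) = H := by
    have hww : wrapB = wrapA := rfl
    funext c
    rw [hww, fold_mark (fun p => (wrapA n (p.1 - 1), wrapA m (p.2 - 1))) true hole
      (fun _ => false) c, ← hwh]
    by_cases h : c ∈ wh <;> simp [hH, h]
  have hFA := FA_isBFS n m H hn hm
  have hFS := FB_isBFS n m H 0 0 ⟨le_refl 0, by omega, le_refl 0, by omega⟩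
  have hFE := FB_isBFS n m H (n - 1) (m - 1) ⟨by omega, by omega, by omega, by omega⟩
  have eq0 : (solLoopF n m (fun c => if H c = true then 1 else 0) (2 * n.toNat * m.toNat + 2)
      [(0, 0, 0)] (fun v => if v = (0, 0, 0) then 0 else -1)) (n - 1, m - 1, 0) =
      bfsBF n m H 0 0 (n - 1, m - 1) := by
    refine isBFS_agree_at hFA hFS ?_
    intro k
    exact walk_same_iff n m H 0 (Or.inl rfl) k ((0 : Int), (0 : Int)) ((n - 1), (m - 1))
  have eq1 := jump_eq n m H _ _ _ hn hm hFA hFS hFE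
  have hrelA := solLoop_bridge n m (fun c => if H c = true then 1 else 0)
    (2 * n.toNat * m.toNat + 2) [(0, 0, 0)] (Std.HashMap.emptyWithCapacity.insert (0, 0, 0) 0)
    (fun v => if v = (0, 0, 0) then 0 else -1) (initRelH (0, 0, 0))
  have hrelS := bfsB_bridge n m H 0 0
  have hrelE := bfsB_bridge n m H (n - 1) (m - 1)
  have hjm := jumpMin_bridge n m H (bfsB n m H 0 0) (bfsB n m H (n - 1) (m - 1))
    (bfsBF n m H 0 0) (bfsBF n m H (n - 1) (m - 1)) hrelS hrelE
  unfold RelH at hrelA hrelS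
  simp only [solution, solution_alt]
  rw [hmp, hbl, hrelA (n - 1, m - 1, 0), hrelA (n - 1, m - 1, 1), hrelS (n - 1, m - 1), hjm,
    eq0, eq1]

-- ===== VERDICT =====
theorem solution_spec : Claim_equal_solution := by
  intro n m hole _ hpre
  exact solution_eq_alt n m hole hpre.1 hpre.2.1
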